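-- pv_equiv track=rewrite | github.com/dashan8020-ai/learn-ai | scripts/daily_update.py | format_entries_simple
-- ===== SOURCE A (Python) =====
-- def format_entries_simple(entries: list[dict]) -> str:
--     """无 LLM 时的简单格式化。"""
--     by_cat = {"research": [], "industry": [], "tools": [], "community": []}
--     for e in entries:
--         by_cat.setdefault(e["category"], []).append(e)
--
--     cat_names = {
--         "research": "研究论文",
--         "industry": "行业动态",
--         "tools": "工具更新",
--         "community": "社区资讯",
--     }
--
--     sections = []
--     for cat_key, cat_label in cat_names.items():
--         items = by_cat.get(cat_key, [])[:8]
--         section = f"## {cat_label}\n\n"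
--         if items:
--             for e in items:
--                 section += f"- **{e['title']}** ({e['source']}) — [{e['link']}]({e['link']})\n"
--         else:
--             section += "- （暂无）\n"
--         sections.append(section)
--
--     return "\n\n".join(sections)
-- ===== SOURCE B (Python) =====
-- def format_entries_simple(entries: list[dict]) -> str:
--     """无 LLM 时的简单格式化。"""
--     cat_names = {
--         "research": "研究论文",
--         "industry": "行业动态",
--         "tools": "工具更新",
--         "community": "社区资讯",
--     }
--     sections = []
--     for cat_key, cat_label in cat_names.items():
--         items = [e for e in entries if e["category"] == cat_key][:8]
--         lines = [f"- **{e['title']}** ({e['source']}) — [{e['link']}]({e['link']})\n" for e in items] or ["- （暂无）\n"]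
--         sections.append(f"## {cat_label}\n\n" + "".join(lines))
--     return "\n\n".join(sections)
-- ===== Notes on version B (the rewrite author's own statement) =====
-- stated objective: simpler
-- what changed: B drops A's grouping dict (single pass building by_cat, then read back per category) and instead filters the entries list once per fixed category with a comprehension, joining the bullet lines instead of accumulating a string.
import Mathlib
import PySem

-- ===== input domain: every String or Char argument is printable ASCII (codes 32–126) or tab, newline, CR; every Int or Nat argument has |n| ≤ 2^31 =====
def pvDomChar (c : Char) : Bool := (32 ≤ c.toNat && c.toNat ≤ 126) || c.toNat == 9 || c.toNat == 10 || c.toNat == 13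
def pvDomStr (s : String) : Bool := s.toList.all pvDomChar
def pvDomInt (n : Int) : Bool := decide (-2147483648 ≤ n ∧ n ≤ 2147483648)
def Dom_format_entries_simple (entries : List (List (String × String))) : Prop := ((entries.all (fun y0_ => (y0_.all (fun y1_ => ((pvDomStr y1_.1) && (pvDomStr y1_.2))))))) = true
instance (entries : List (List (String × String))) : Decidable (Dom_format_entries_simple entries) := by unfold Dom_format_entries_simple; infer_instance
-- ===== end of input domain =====

-- B drops A's grouping dict and instead filters the entry list once per fixed category (simpler; same O(n) cost).

-- shared helper: e[k] for an entry modelled as an association list (Python dict; last duplicate wins, as dict() does);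
-- the default "" is only reached outside Pre_ (where the Python raises KeyError)
def pvDget (e : List (String × String)) (k : String) : String :=
  ((PySem.Dict.ofList e).get? k).getD ""

-- the per-item bullet line (identical f-string in both Pythons)
def pvLine (e : List (String × String)) : String :=
  "- **" ++ pvDget e "title" ++ "** (" ++ pvDget e "source" ++ ") — [" ++ pvDget e "link" ++ "](" ++ pvDget e "link" ++ ")\n"

-- ===== PORT A =====
def format_entries_simple (entries : List (List (String × String))) : String :=
  let by_cat : PySem.Dict String (List (List (String × String))) :=
    entries.foldl (fun d e => d.modify (pvDget e "category") [] (· ++ [e]))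
      (PySem.Dict.ofList [("research", []), ("industry", []), ("tools", []), ("community", [])])
  let cat_names : PySem.Dict String String :=
    PySem.Dict.ofList [("research", "研究论文"), ("industry", "行业动态"), ("tools", "工具更新"), ("community", "社区资讯")]
  let sections : List String :=
    cat_names.items.foldl (fun acc p =>
      let items := PySem.List.slice (by_cat.getD p.1 []) none (some 8)
      let sec := "## " ++ p.2 ++ "\n\n"
      let sec :=
        if items.isEmpty then sec ++ "- （暂无）\n"
        else items.foldl (fun s e => s ++ pvLine e) sec
      acc ++ [sec]) []
  PySem.Str.join "\n\n" sections

-- ===== PORT B =====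
def format_entries_simple_alt (entries : List (List (String × String))) : String :=
  let cat_names : List (String × String) :=
    [("research", "研究论文"), ("industry", "行业动态"), ("tools", "工具更新"), ("community", "社区资讯")]
  let sections : List String :=
    cat_names.map (fun p =>
      let items := PySem.List.slice (entries.filter (fun e => pvDget e "category" == p.1)) none (some 8)
      let lines := items.map pvLine
      let lines := if lines = [] then ["- （暂无）\n"] else lines
      "## " ++ p.2 ++ "\n\n" ++ PySem.Str.join "" lines)
  PySem.Str.join "\n\n" sections

-- ===== PRECONDITION & SPEC =====
-- Pre_ excludes exactly the inputs where the Python A raises KeyError: an entry without a "category" key,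
-- or an entry that gets formatted (among the first 8 of one of the four fixed categories) without "title"/"source"/"link".
def Pre_format_entries_simple (entries : List (List (String × String))) : Prop :=
  (∀ e ∈ entries, (PySem.Dict.ofList e).contains "category" = true) ∧
  (∀ k ∈ ["research", "industry", "tools", "community"],
    ∀ e ∈ (entries.filter (fun e => pvDget e "category" == k)).take 8,
      (PySem.Dict.ofList e).contains "title" = true ∧
      (PySem.Dict.ofList e).contains "source" = true ∧
      (PySem.Dict.ofList e).contains "link" = true)
instance (entries : List (List (String × String))) : Decidable (Pre_format_entries_simple entries) := by
  unfold Pre_format_entries_simple; infer_instance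

def pvWitness_format_entries_simple : (List (List (String × String))) :=
  [[("category", "research"), ("title", "T"), ("source", "S"), ("link", "L")],
   [("category", "misc")]]

def Spec_format_entries_simple (entries : List (List (String × String))) (out : String) : Prop := out = format_entries_simple_alt entries
instance (entries : List (List (String × String))) (out : String) : Decidable (Spec_format_entries_simple entries out) := by unfold Spec_format_entries_simple; infer_instance

-- ===== CLAIM (what is proved, stated in full; the proofs are below) =====
def Claim_equal_format_entries_simple : Prop := ∀ (entries : List (List (String × String))), Dom_format_entries_simple entries → Pre_format_entries_simple entries → Spec_format_entries_simple entries (format_entries_simple entries)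


-- ===== LEMMAS AND PROOFS =====

-- A's grouping dict, read back at a key present in the initial dict, is B's filter
theorem pv_group_eq (entries : List (List (String × String))) (k : String)
    (init : PySem.Dict String (List (List (String × String)))) (h0 : init.getD k [] = []) :
    (entries.foldl (fun d e => d.modify (pvDget e "category") [] (· ++ [e])) init).getD k []
      = entries.filter (fun e => pvDget e "category" == k) := by
  have hmap : entries.foldl (fun d e => d.modify (pvDget e "category") [] (· ++ [e])) init
      = (entries.map (fun e => (pvDget e "category", e))).foldl
          (fun d p => d.modify p.1 [] (· ++ [p.2])) init := by
    rw [List.foldl_map]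
  rw [hmap, PySem.Dict.getD_foldl_modify_append, h0, List.filter_map, List.map_map]
  simp [Function.comp_def]

theorem pv_join_empty_nil : PySem.Str.join "" ([] : List String) = "" := by decide

-- "".join over a cons
theorem pv_join_empty_cons (x : String) (xs : List String) :
    PySem.Str.join "" (x :: xs) = x ++ PySem.Str.join "" xs := by
  apply String.toList_inj.mp
  simp [PySem.Str.join, PySem.Chars.join, List.intercalate]
  cases xs <;> simp

-- A's string-accumulating loop over the items is the header ++ the joined bullet lines
theorem pv_section_fold (items : List (List (String × String))) (hdr : String) :
    items.foldl (fun s e => s ++ pvLine e) hdr = hdr ++ PySem.Str.join "" (items.map pvLine) := by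
  induction items generalizing hdr with
  | nil => simp [pv_join_empty_nil]
  | cons e rest ih =>
    simp only [List.foldl_cons, List.map_cons, ih, pv_join_empty_cons, String.append_assoc]

-- A's branch-and-loop section body equals B's comprehension-and-join section body, for equal item lists
theorem pv_sec_eq (xs : List (List (String × String))) (lbl : String) :
    (if xs.isEmpty then ("## " ++ lbl ++ "\n\n") ++ "- （暂无）\n"
     else xs.foldl (fun s e => s ++ pvLine e) ("## " ++ lbl ++ "\n\n"))
    = "## " ++ lbl ++ "\n\n" ++ PySem.Str.join ""
        (if xs.map pvLine = [] then ["- （暂无）\n"] else xs.map pvLine) := by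
  cases xs with
  | nil => simp [pv_join_empty_cons, pv_join_empty_nil]
  | cons e rest => simp [pv_section_fold, pv_join_empty_cons, String.append_assoc]

-- ===== VERDICT (by name: the statement is the Claim_ definition above) =====
theorem format_entries_simple_spec : Claim_equal_format_entries_simple := by
  intro entries _ _
  unfold Spec_format_entries_simple format_entries_simple format_entries_simple_alt
  have hitems : (PySem.Dict.ofList [("research", "研究论文"), ("industry", "行业动态"), ("tools", "工具更新"), ("community", "社区资讯")]).items
      = [("research", "研究论文"), ("industry", "行业动态"), ("tools", "工具更新"), ("community", "社区资讯")] := by rfl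
  simp only [hitems, PySem.List.foldl_append_singleton_eq_map, List.nil_append]
  congr 1
  apply List.map_congr_left
  intro p hp
  have h0 : (PySem.Dict.ofList
      ([("research", []), ("industry", []), ("tools", []), ("community", [])] :
        List (String × List (List (String × String))))).getD p.1 [] = [] := by
    fin_cases hp <;> decide
  rw [pv_group_eq entries p.1 _ h0]
  have hs : PySem.List.slice (entries.filter (fun e => pvDget e "category" == p.1)) none (some 8)
      = (entries.filter (fun e => pvDget e "category" == p.1)).take 8 :=
    PySem.List.slice_to_natCast (entries.filter (fun e => pvDget e "category" == p.1)) 8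
  rw [hs]
  simpa using pv_sec_eq ((entries.filter (fun e => pvDget e "category" == p.1)).take 8) p.2
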